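-- pv_equiv track=rewrite | github.com/came0987/dbms_mpei | main.py | format_row_numbers
-- ===== SOURCE A (Python) =====
-- def format_row_numbers(row_numbers):
--     """Форматирует список номеров строк для вывода в диалоговом окне."""
--     row_numbers.sort()
--     formatted_numbers = []
--     current_range = []
--
--     for i, number in enumerate(row_numbers):
--         if i == 0 or number == row_numbers[i - 1] + 1:
--             current_range.append(number)
--         else:
--             if len(current_range) > 1:
--                 formatted_numbers.append(f"{current_range[0]}-{current_range[-1]}")
--             elif len(current_range) == 1:
--                 formatted_numbers.append(str(current_range[0]))
--             current_range = [number]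
--
--     if len(current_range) > 1:
--         formatted_numbers.append(f"{current_range[0]}-{current_range[-1]}")
--     elif len(current_range) == 1:
--         formatted_numbers.append(str(current_range[0]))
--
--     return f"Удалить строки с номерами {', '.join(formatted_numbers)}?"
-- ===== SOURCE B (Python) =====
-- def format_row_numbers(row_numbers):
--     row_numbers.sort()
--     pieces = []
--     i, n = 0, len(row_numbers)
--     while i < n:
--         j = i
--         while j + 1 < n and row_numbers[j + 1] == row_numbers[j] + 1:
--             j += 1
--         pieces.append(str(row_numbers[i]) if i == j else f"{row_numbers[i]}-{row_numbers[j]}")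
--         i = j + 1
--     return f"Удалить строки с номерами {', '.join(pieces)}?"
-- ===== Notes on version B (the rewrite author's own statement) =====
-- stated objective: simpler
-- what changed: Replaces the accumulator-with-current_range fold (with its duplicated flush logic in the loop and after it) by a two-pointer while loop that scans each maximal consecutive run [i..j] at once and formats it at a single site.
import Mathlib
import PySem

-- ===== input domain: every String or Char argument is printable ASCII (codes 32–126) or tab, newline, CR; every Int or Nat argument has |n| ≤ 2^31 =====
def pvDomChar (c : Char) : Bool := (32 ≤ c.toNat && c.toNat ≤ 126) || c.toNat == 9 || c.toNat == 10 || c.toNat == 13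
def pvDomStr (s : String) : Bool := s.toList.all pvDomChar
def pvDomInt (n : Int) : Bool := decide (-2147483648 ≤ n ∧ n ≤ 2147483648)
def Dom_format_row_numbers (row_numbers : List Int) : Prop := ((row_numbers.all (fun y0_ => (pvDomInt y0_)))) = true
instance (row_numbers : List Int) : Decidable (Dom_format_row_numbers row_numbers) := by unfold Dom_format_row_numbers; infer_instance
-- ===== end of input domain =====

-- B replaces A's current_range accumulator (with its duplicated flush logic) by a
-- two-pointer scan of maximal consecutive runs; same return value. A sorts its
-- argument in place (B does too); the equivalence proved here is about the return value.

-- ===== PORT A =====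
-- flush of current_range into formatted_numbers (the duplicated if/elif block of A)
def pvFlushA (fmt : List String) (cur : List Int) : List String :=
  if cur.length > 1 then
    fmt ++ [PySem.Int.toStr (PySem.List.pyGetD cur 0 0) ++ "-" ++ PySem.Int.toStr (PySem.List.pyGetD cur (-1) 0)]
  else if cur.length = 1 then
    fmt ++ [PySem.Int.toStr (PySem.List.pyGetD cur 0 0)]
  else fmt

-- one iteration of A's for-loop over enumerate(row_numbers)
def pvStepA (s : List Int) (st : List String × List Int) (p : Int × Int) : List String × List Int :=
  if p.1 = 0 ∨ p.2 = PySem.List.pyGetD s (p.1 - 1) 0 + 1 then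
    (st.1, st.2 ++ [p.2])
  else
    (pvFlushA st.1 st.2, [p.2])

def format_row_numbers (row_numbers : List Int) : String :=
  let s := PySem.List.sorted row_numbers (fun x => x) false
  let st := (PySem.List.enumerate s 0).foldl (pvStepA s) ([], [])
  let formatted := pvFlushA st.1 st.2
  "Удалить строки с номерами " ++ PySem.Str.join ", " formatted ++ "?"

-- ===== PORT B =====
-- inner while: advance j over the maximal consecutive run
def pvFindJ (s : List Int) (n j : Int) : Int :=
  if h : j + 1 < n ∧ PySem.List.pyGetD s (j + 1) 0 = PySem.List.pyGetD s j 0 + 1 then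
    pvFindJ s n (j + 1)
  else j
termination_by (n - j).toNat
decreasing_by omega

theorem le_pvFindJ (s : List Int) (n j : Int) : j ≤ pvFindJ s n j := by
  unfold pvFindJ
  split
  · have := le_pvFindJ s n (j + 1); omega
  · omega
termination_by (n - j).toNat
decreasing_by omega

-- outer while over i, appending one piece per run
def pvOuterB (s : List Int) (n : Int) (acc : List String) (i : Int) : List String :=
  if h : i < n then
    let j := pvFindJ s n i
    let piece := if i = j then PySem.Int.toStr (PySem.List.pyGetD s i 0)
                 else PySem.Int.toStr (PySem.List.pyGetD s i 0) ++ "-" ++ PySem.Int.toStr (PySem.List.pyGetD s j 0)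
    pvOuterB s n (acc ++ [piece]) (j + 1)
  else acc
termination_by (n - i).toNat
decreasing_by have := le_pvFindJ s n i; omega

def format_row_numbers_alt (row_numbers : List Int) : String :=
  let s := PySem.List.sorted row_numbers (fun x => x) false
  let pieces := pvOuterB s (PySem.List.len s) [] 0
  "Удалить строки с номерами " ++ PySem.Str.join ", " pieces ++ "?"

-- ===== PRECONDITION & SPEC =====
def Spec_format_row_numbers (row_numbers : List Int) (out : String) : Prop := out = format_row_numbers_alt row_numbers
instance (row_numbers : List Int) (out : String) : Decidable (Spec_format_row_numbers row_numbers out) := by unfold Spec_format_row_numbers; infer_instance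

-- ===== CLAIM (what is proved, stated in full; the proofs are below) =====
def Claim_equal_format_row_numbers : Prop := ∀ (row_numbers : List Int), Dom_format_row_numbers row_numbers → Spec_format_row_numbers row_numbers (format_row_numbers row_numbers)

-- ===== LEMMAS AND PROOFS =====

-- maximal consecutive chain after prev: values taken, rest
def pvChain : Int → List Int → List Int × List Int
  | _, [] => ([], [])
  | prev, x :: t =>
    if x = prev + 1 then
      let r := pvChain x t; (x :: r.1, r.2)
    else ([], x :: t)

theorem pvChain_snd_len (prev : Int) (t : List Int) : (pvChain prev t).2.length ≤ t.length := by
  induction t generalizing prev with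
  | nil => simp [pvChain]
  | cons x t ih =>
    simp only [pvChain]
    split
    · exact le_trans (ih x) (by simp)
    · simp

theorem pvChain_append (prev : Int) (t : List Int) :
    (pvChain prev t).1 ++ (pvChain prev t).2 = t := by
  induction t generalizing prev with
  | nil => simp [pvChain]
  | cons x t ih => simp only [pvChain]; split <;> simp [ih]

-- the runs decomposition both programs compute
def pvRuns : List Int → List (List Int)
  | [] => []
  | x :: t => (x :: (pvChain x t).1) :: pvRuns (pvChain x t).2
termination_by xs => xs.length
decreasing_by have := pvChain_snd_len x t; simp; omega

def pvPiece (g : List Int) : String :=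
  if g.length > 1 then PySem.Int.toStr (g.headD 0) ++ "-" ++ PySem.Int.toStr (g.getLastD 0)
  else PySem.Int.toStr (g.headD 0)

-- A's state-machine form with the previous value carried explicitly
def pvRunsFrom (cur : List Int) (prev : Int) : List Int → List (List Int)
  | [] => [cur]
  | x :: t => if x = prev + 1 then pvRunsFrom (cur ++ [x]) x t else cur :: pvRunsFrom [x] x t

theorem pvRunsFrom_eq_chain (t : List Int) (cur : List Int) (prev : Int) :
    pvRunsFrom cur prev t = (cur ++ (pvChain prev t).1) :: pvRuns (pvChain prev t).2 := by
  induction t generalizing cur prev with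
  | nil => simp [pvRunsFrom, pvChain, pvRuns]
  | cons x t ih =>
    simp only [pvRunsFrom, pvChain]
    split
    · rw [ih]; simp
    · rw [ih]; simp [pvRuns]

theorem pvRunsFrom_single (x : Int) (t : List Int) :
    pvRunsFrom [x] x t = pvRuns (x :: t) := by
  rw [pvRunsFrom_eq_chain]; simp [pvRuns]

theorem pvFlushA_nonempty (fmt : List String) (cur : List Int) (h : cur ≠ []) :
    pvFlushA fmt cur = fmt ++ [pvPiece cur] := by
  unfold pvFlushA pvPiece
  rw [PySem.List.pyGetD_neg_one (h := h), PySem.List.pyGetD_zero]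
  rcases cur with _ | ⟨a, t⟩
  · exact absurd rfl h
  · rcases t with _ | ⟨b, t⟩
    · simp
    · rcases t with _ | ⟨c, t⟩
      · simp
      · have hg : (c :: t).getLast? = some ((c :: t).getLast (by simp)) := List.getLast?_eq_some_getLast _
        simp [List.getLast?_cons_cons, hg]

-- previous element of the sorted list, read through pyGetD
theorem pvPrev_getD (u v : List Int) (h : u ≠ []) :
    PySem.List.pyGetD (u ++ v) ((u.length : Int) - 1) 0 = u.getLast h := by
  have h1 : 0 < u.length := List.length_pos_iff.mpr h
  have h2 : ((u.length : Int) - 1) = ((u.length - 1 : Nat) : Int) := by omega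
  rw [h2, PySem.List.pyGetD_natCast]
  rw [List.getD_eq_getElem?_getD, List.getElem?_append_left (by omega)]
  rw [List.getElem?_eq_getElem (by omega)]
  simp [List.getLast_eq_getElem]

theorem pvHead_getD (u : List Int) (x : Int) (v : List Int) :
    PySem.List.pyGetD (u ++ x :: v) (u.length : Int) 0 = x := by
  rw [PySem.List.pyGetD_natCast, List.getD_eq_getElem?_getD, List.getElem?_append_right (by omega)]
  simp

-- ===== A-side =====
theorem pvFoldA (v u : List Int) (fmt : List String) (cur : List Int)
    (hu : u ≠ []) (hc : cur ≠ []) :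
    (fun st => pvFlushA st.1 st.2)
        (((PySem.List.enumerate v (u.length : Int)).foldl (pvStepA (u ++ v)) (fmt, cur)))
      = fmt ++ (pvRunsFrom cur (u.getLast hu) v).map pvPiece := by
  induction v generalizing u fmt cur with
  | nil =>
    simp only [PySem.List.enumerate_nil, List.foldl_nil, pvRunsFrom, List.map]
    exact pvFlushA_nonempty fmt cur hc
  | cons x t ih =>
    rw [PySem.List.enumerate_cons, List.foldl_cons]
    have hprev : PySem.List.pyGetD (u ++ x :: t) ((u.length : Int) - 1) 0 = u.getLast hu :=
      pvPrev_getD u (x :: t) hu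
    have hne : ((u.length : Int)) ≠ 0 := by
      have : 0 < u.length := List.length_pos_iff.mpr hu
      omega
    have hcast : (u.length : Int) + 1 = ((u ++ [x]).length : Int) := by simp
    have happ : (u ++ [x]) ++ t = u ++ x :: t := by simp
    have hlast : (u ++ [x]).getLast (by simp) = x := by
      simp
    by_cases hx : x = u.getLast hu + 1
    · have hstep : pvStepA (u ++ x :: t) (fmt, cur) ((u.length : Int), x) = (fmt, cur ++ [x]) := by
        unfold pvStepA
        rw [if_pos]
        right; rw [hprev]; exact hx
      rw [hstep, hcast]
      have := ih (u ++ [x]) fmt (cur ++ [x]) (by simp) (by simp)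
      rw [happ] at this
      rw [this, hlast]
      simp only [pvRunsFrom, if_pos hx]
    · have hstep : pvStepA (u ++ x :: t) (fmt, cur) ((u.length : Int), x) = (pvFlushA fmt cur, [x]) := by
        unfold pvStepA
        rw [if_neg]
        rintro (h0 | h1)
        · exact hne h0
        · rw [hprev] at h1; exact hx h1
      rw [hstep, hcast]
      have := ih (u ++ [x]) (pvFlushA fmt cur) [x] (by simp) (by simp)
      rw [happ] at this
      rw [this, hlast, pvFlushA_nonempty fmt cur hc]
      simp [pvRunsFrom, if_neg hx]

theorem pvA_eq_runs (s : List Int) :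
    (fun st => pvFlushA st.1 st.2) ((PySem.List.enumerate s 0).foldl (pvStepA s) ([], []))
      = (pvRuns s).map pvPiece := by
  rcases s with _ | ⟨x, t⟩
  · simp [PySem.List.enumerate_nil, pvFlushA, pvRuns]
  · rw [PySem.List.enumerate_cons, List.foldl_cons]
    have hstep : pvStepA (x :: t) ([], []) (0, x) = ([], [x]) := by
      unfold pvStepA; rw [if_pos (Or.inl rfl)]; rfl
    rw [hstep]
    have := pvFoldA t [x] [] [x] (by simp) (by simp)
    simp only [List.cons_append, List.nil_append, List.length_cons, List.length_nil,
      List.getLast_singleton] at this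
    norm_num at this ⊢
    rw [this, pvRunsFrom_single]

-- ===== B-side =====
theorem pvFindJ_eq (u : List Int) (x : Int) (t : List Int) :
    pvFindJ (u ++ x :: t) (((u ++ x :: t).length : Int)) ((u.length : Int))
      = (u.length : Int) + ((pvChain x t).1).length := by
  induction t generalizing u x with
  | nil =>
    rw [pvFindJ, dif_neg]
    · simp [pvChain]
    · rintro ⟨h1, -⟩
      simp at h1
  | cons y t ih =>
    have hs : u ++ x :: y :: t = (u ++ [x]) ++ y :: t := by simp
    have hy : PySem.List.pyGetD (u ++ x :: y :: t) ((u.length : Int) + 1) 0 = y := by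
      rw [hs]
      have := pvHead_getD (u ++ [x]) y t
      simpa using this
    have hx : PySem.List.pyGetD (u ++ x :: y :: t) ((u.length : Int)) 0 = x :=
      pvHead_getD u x (y :: t)
    by_cases hc : y = x + 1
    · rw [pvFindJ, dif_pos ⟨by simp, by rw [hy, hx, hc]⟩]
      have := ih (u ++ [x]) y
      rw [← hs] at this
      have hlen : ((u ++ [x]).length : Int) = (u.length : Int) + 1 := by simp
      rw [hlen] at this
      rw [this]
      simp [pvChain, if_pos hc]
      omega
    · rw [pvFindJ, dif_neg]
      · simp [pvChain, if_neg hc]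
      · rintro ⟨-, h2⟩
        rw [hy, hx] at h2
        exact hc h2

theorem pvOuterB_eq (k : Nat) (v u : List Int) (acc : List String) (hk : v.length ≤ k) :
    pvOuterB (u ++ v) (((u ++ v).length : Int)) acc (u.length : Int)
      = acc ++ (pvRuns v).map pvPiece := by
  induction k generalizing v u acc with
  | zero =>
    have : v = [] := by
      cases v
      · rfl
      · simp at hk
    subst this
    rw [pvOuterB, dif_neg (by simp)]
    simp [pvRuns]
  | succ k ih =>
    rcases v with _ | ⟨x, t⟩
    · rw [pvOuterB, dif_neg (by simp)]
      simp [pvRuns]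
    · have hchain := pvChain_append x t
      set c1 := (pvChain x t).1 with hc1
      set c2 := (pvChain x t).2 with hc2
      have hs : u ++ x :: t = (u ++ x :: c1) ++ c2 := by
        rw [← hchain]; simp
      have hj := pvFindJ_eq u x t
      rw [pvOuterB, dif_pos (by simp)]
      simp only [← hc1] at hj ⊢
      rw [hj]
      have hxv : PySem.List.pyGetD (u ++ x :: t) ((u.length : Int)) 0 = x :=
        pvHead_getD u x t
      have hlastv : PySem.List.pyGetD (u ++ x :: t) ((u.length : Int) + c1.length) 0
          = (x :: c1).getLast (by simp) := by
        rw [hs]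
        have hl : ((u.length : Int) + c1.length) = (((u ++ x :: c1).length : Int)) - 1 := by
          simp; omega
        rw [hl, pvPrev_getD (u ++ x :: c1) c2 (by simp)]
        rw [List.getLast_append_of_ne_nil (by simp)]
      have hpiece :
          (if (u.length : Int) = (u.length : Int) + c1.length then
             PySem.Int.toStr (PySem.List.pyGetD (u ++ x :: t) ((u.length : Int)) 0)
           else PySem.Int.toStr (PySem.List.pyGetD (u ++ x :: t) ((u.length : Int)) 0) ++ "-" ++
             PySem.Int.toStr (PySem.List.pyGetD (u ++ x :: t) ((u.length : Int) + c1.length) 0))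
          = pvPiece (x :: c1) := by
        rcases c1 with _ | ⟨b, c1'⟩
        · rw [if_pos (by simp), hxv]
          simp [pvPiece]
        · rw [if_neg (by simp; omega), hxv, hlastv]
          simp only [pvPiece, List.length_cons]
          rw [if_pos (by omega)]
          have hg : (x :: b :: c1').getLast (by simp) = (x :: b :: c1').getLastD 0 := by
            rw [List.getLastD_eq_getLast?]
            rw [List.getLast?_eq_some_getLast (l := x :: b :: c1') (by simp)]
            rfl
          simp [hg]
      rw [hpiece]
      have harith : (u.length : Int) + c1.length + 1 = (((u ++ x :: c1)).length : Int) := by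
        simp; omega
      rw [harith, hs]
      have ht : c2.length ≤ k := by
        have h1 : c2.length ≤ t.length := pvChain_snd_len x t
        simp at hk; omega
      rw [ih c2 (u ++ x :: c1) (acc ++ [pvPiece (x :: c1)]) ht]
      have : pvRuns (x :: t) = (x :: c1) :: pvRuns c2 := by
        rw [pvRuns]
      rw [this]
      simp

theorem pvB_eq_runs (s : List Int) :
    pvOuterB s (PySem.List.len s) [] 0 = (pvRuns s).map pvPiece := by
  have := pvOuterB_eq s.length s [] [] (le_refl _)
  simpa [PySem.List.len_eq] using this

-- ===== VERDICT (by name: the statement is the Claim_ definition above) =====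
theorem format_row_numbers_spec : Claim_equal_format_row_numbers := by
  intro rs _
  unfold Spec_format_row_numbers format_row_numbers format_row_numbers_alt
  simp only
  rw [pvB_eq_runs, ← pvA_eq_runs]
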